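-- pv_equiv track=rewrite | github.com/KotaAzul/Coding_Experiments | Python/PlayfairCipher.py | ceasarGen
-- ===== SOURCE A (Python) =====
-- def ceasarGen(shift):
--     alphabet = "ABCDEFGHIJKLMNOPQRSTUVWXYZ"
--     new_alphabet = ""
--     cipher_message = ""
--
--     count = 0
--     while count != 2:
--         for each in alphabet:
--             if each == alphabet[shift]:
--                 count += 1
--             if count == 1:
--                 new_alphabet += each
--     return new_alphabet
-- ===== SOURCE B (Python) =====
-- def ceasarGen(shift):
--     alphabet = "ABCDEFGHIJKLMNOPQRSTUVWXYZ"
--     i = shift % 26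
--     return alphabet[i:] + alphabet[:i]
-- ===== Notes on version B (the rewrite author's own statement) =====
-- stated objective: simpler
-- what changed: Replaces the counter-driven two-full-pass state machine over the alphabet with a closed-form slice concatenation alphabet[shift % 26:] + alphabet[:shift % 26].
import Mathlib
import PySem

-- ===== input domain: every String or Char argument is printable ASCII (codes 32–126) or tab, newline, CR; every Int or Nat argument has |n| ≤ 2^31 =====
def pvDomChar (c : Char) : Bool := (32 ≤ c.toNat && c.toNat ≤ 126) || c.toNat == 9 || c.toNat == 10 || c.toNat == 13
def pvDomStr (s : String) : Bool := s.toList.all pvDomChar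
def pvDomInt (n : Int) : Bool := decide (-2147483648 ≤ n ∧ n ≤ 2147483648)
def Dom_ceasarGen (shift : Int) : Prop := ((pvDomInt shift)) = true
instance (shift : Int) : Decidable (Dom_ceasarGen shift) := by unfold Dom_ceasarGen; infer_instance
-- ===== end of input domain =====

-- B replaces A's counter-driven two-pass loop by the closed-form slice rotation
-- alphabet[shift % 26:] + alphabet[:shift % 26] (objective: simpler).

-- ===== PORT A =====
-- the inner 'for each in alphabet' pass: state = (count, new_alphabet);
-- pivot = alphabet[shift] (none if the index is out of range — excluded by Pre_)
def ceasarPass (pivot : Option Char) (st : Int × List Char) : Int × List Char :=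
  "ABCDEFGHIJKLMNOPQRSTUVWXYZ".toList.foldl
    (fun st each =>
      let count := if some each = pivot then st.1 + 1 else st.1
      (count, if count = 1 then st.2 ++ [each] else st.2)) st

-- the 'while count != 2' loop; fuel only makes the loop total (3 suffices: each
-- pass over the alphabet meets alphabet[shift] exactly once)
def ceasarWhile (pivot : Option Char) : Nat → Int × List Char → Int × List Char
  | 0, st => st
  | n + 1, st => if st.1 ≠ 2 then ceasarWhile pivot n (ceasarPass pivot st) else st

def ceasarGen (shift : Int) : String :=
  let alphabet := "ABCDEFGHIJKLMNOPQRSTUVWXYZ".toList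
  let pivot := PySem.List.pyGet? alphabet shift
  String.ofList (ceasarWhile pivot 3 (0, [])).2

-- ===== PORT B =====
def ceasarGen_alt (shift : Int) : String :=
  let alphabet := "ABCDEFGHIJKLMNOPQRSTUVWXYZ".toList
  let i := PySem.Int.mod shift 26
  String.ofList (PySem.List.slice alphabet (some i) none ++ PySem.List.slice alphabet none (some i))

-- ===== PRECONDITION & SPEC =====
-- Pre_ excludes exactly the shifts on which A raises IndexError at alphabet[shift].
def Pre_ceasarGen (shift : Int) : Prop := -26 ≤ shift ∧ shift < 26
instance (shift : Int) : Decidable (Pre_ceasarGen shift) := by unfold Pre_ceasarGen; infer_instance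
def pvWitness_ceasarGen : Int := (3)

def Spec_ceasarGen (shift : Int) (out : String) : Prop := out = ceasarGen_alt shift
instance (shift : Int) (out : String) : Decidable (Spec_ceasarGen shift out) := by unfold Spec_ceasarGen; infer_instance

-- ===== CLAIM (what is proved, stated in full; the proofs are below) =====
def Claim_equal_ceasarGen : Prop := ∀ (shift : Int), Dom_ceasarGen shift → Pre_ceasarGen shift → Spec_ceasarGen shift (ceasarGen shift)

-- ===== LEMMAS AND PROOFS =====

-- ===== VERDICT (by name: the statement is the Claim_ definition above) =====
theorem ceasarGen_spec : Claim_equal_ceasarGen := by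
  intro shift _ hpre
  unfold Spec_ceasarGen
  obtain ⟨h1, h2⟩ := hpre
  interval_cases shift <;> decide
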